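-- pv_equiv track=rewrite | github.com/prommis/idaes-connectivity | idaes_connectivity/base.py | _find_common_prefix_len
-- ===== SOURCE A (Python) =====
-- def _find_common_prefix_len(tuple_list) -> int:
--     """Get common prefix length (to strip) from a list of tuples."""
--     if len(tuple_list) < 1:
--         return 0  # for len=1, we still don't want to strip it
--     shortest_tuple = min(map(len, tuple_list))
--     n = 1
--     while n <= shortest_tuple:
--         # continue only if the set of prefixes is length 1,
--         # which means they are all the same
--         if len({tuple(nm[:n]) for nm in tuple_list}) > 1:
--             return n - 1
--         n += 1
--     return shortest_tuple
-- ===== SOURCE B (Python) =====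
-- def _find_common_prefix_len(tuple_list) -> int:
--     """Get common prefix length (to strip) from a list of tuples."""
--     if not tuple_list:
--         return 0
--     pre = list(tuple_list[0])
--     for t in tuple_list[1:]:
--         j = 0
--         while j < len(pre) and j < len(t) and pre[j] == t[j]:
--             j += 1
--         del pre[j:]
--     return len(pre)
-- ===== Notes on version B (the rewrite author's own statement) =====
-- stated objective: faster
-- what changed: A scans prefix columns, building a set of all tuples' length-n prefixes for every n; B folds pairwise, keeping one running common prefix and truncating it at the first mismatch with each next tuple.
import Mathlib
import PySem

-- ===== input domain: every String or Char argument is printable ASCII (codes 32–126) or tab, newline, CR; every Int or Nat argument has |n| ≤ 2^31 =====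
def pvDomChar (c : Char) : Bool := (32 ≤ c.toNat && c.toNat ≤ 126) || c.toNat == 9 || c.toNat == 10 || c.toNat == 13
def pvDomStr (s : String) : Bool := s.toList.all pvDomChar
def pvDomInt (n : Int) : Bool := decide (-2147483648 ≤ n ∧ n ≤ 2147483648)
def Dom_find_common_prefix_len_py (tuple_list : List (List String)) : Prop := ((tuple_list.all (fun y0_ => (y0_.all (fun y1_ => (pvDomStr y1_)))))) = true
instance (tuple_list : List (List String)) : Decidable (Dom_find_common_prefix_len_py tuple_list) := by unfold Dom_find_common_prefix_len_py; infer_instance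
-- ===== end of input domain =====

-- B replaces A's per-column set of all prefixes by a single running common prefix folded pairwise (faster; return-value equivalence, no mutation observable).

-- ===== PORT A =====
-- the while-loop of A: n counts up while n <= shortest; the set of length-n prefixes must stay of size <= 1
def pvLoopA (tl : List (List String)) (shortest : Nat) (n : Nat) : Int :=
  if n ≤ shortest then
    if 1 < (PySem.Set.ofList (tl.map (fun nm => nm.take n))).length then (n : Int) - 1
    else pvLoopA tl shortest (n + 1)
  else (shortest : Int)
termination_by shortest + 1 - n

def find_common_prefix_len_py (tuple_list : List (List String)) : Int :=
  if tuple_list.length < 1 then 0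
  else
    let shortest := (PySem.List.min? (tuple_list.map List.length) (fun x => x)).getD 0
    pvLoopA tuple_list shortest 1

-- ===== PORT B =====
-- length of the shared prefix of two tuples (compare by == until first mismatch / exhaustion)
def pvCommonLen (xs ys : List String) : Nat :=
  match xs, ys with
  | a :: xs', b :: ys' => if a == b then pvCommonLen xs' ys' + 1 else 0
  | _, _ => 0

def find_common_prefix_len_py_alt (tuple_list : List (List String)) : Int :=
  match tuple_list with
  | [] => 0
  | t :: rest => ((rest.foldl (fun pre u => pre.take (pvCommonLen pre u)) t).length : Int)

-- ===== PRECONDITION & SPEC =====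
def Spec_find_common_prefix_len_py (tuple_list : List (List String)) (out : Int) : Prop := out = find_common_prefix_len_py_alt tuple_list
instance (tuple_list : List (List String)) (out : Int) : Decidable (Spec_find_common_prefix_len_py tuple_list out) := by unfold Spec_find_common_prefix_len_py; infer_instance

-- ===== CLAIM (what is proved, stated in full; the proofs are below) =====
def Claim_equal_find_common_prefix_len_py : Prop := ∀ (tuple_list : List (List String)), Dom_find_common_prefix_len_py tuple_list → Spec_find_common_prefix_len_py tuple_list (find_common_prefix_len_py tuple_list)

-- ===== LEMMAS AND PROOFS =====

-- "all tuples in rest agree with t on the first m elements"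
def agreeB (t : List String) (rest : List (List String)) (m : Nat) : Bool :=
  rest.all (fun u => u.take m == t.take m)

theorem agreeB_iff (t : List String) (rest : List (List String)) (m : Nat) :
    agreeB t rest m = true ↔ ∀ u ∈ rest, u.take m = t.take m := by
  simp [agreeB]

theorem agree_mono (t : List String) (rest : List (List String)) {m k : Nat}
    (h : agreeB t rest m = true) (hk : k ≤ m) : agreeB t rest k = true := by
  rw [agreeB_iff] at h ⊢
  intro u hu
  have h1 : u.take k = (u.take m).take k := by rw [List.take_take, Nat.min_eq_left hk]
  have h2 : t.take k = (t.take m).take k := by rw [List.take_take, Nat.min_eq_left hk]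
  rw [h1, h2, h u hu]

theorem pvCommonLen_le_left (xs ys : List String) : pvCommonLen xs ys ≤ xs.length := by
  induction xs generalizing ys with
  | nil => cases ys <;> simp [pvCommonLen]
  | cons a xs ih =>
    cases ys with
    | nil => simp [pvCommonLen]
    | cons b ys =>
      simp only [pvCommonLen]
      split <;> simp [Nat.succ_le_succ (ih ys)]

theorem pvCommonLen_le_right (xs ys : List String) : pvCommonLen xs ys ≤ ys.length := by
  induction xs generalizing ys with
  | nil => cases ys <;> simp [pvCommonLen]
  | cons a xs ih =>
    cases ys with
    | nil => simp [pvCommonLen]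
    | cons b ys =>
      simp only [pvCommonLen]
      split <;> simp [Nat.succ_le_succ (ih ys)]

theorem take_pvCommonLen (xs ys : List String) :
    xs.take (pvCommonLen xs ys) = ys.take (pvCommonLen xs ys) := by
  induction xs generalizing ys with
  | nil => cases ys <;> simp [pvCommonLen]
  | cons a xs ih =>
    cases ys with
    | nil => simp [pvCommonLen]
    | cons b ys =>
      simp only [pvCommonLen]
      split
      · next h => simp [List.take_succ_cons, eq_of_beq h, ih ys]
      · simp

theorem take_eq_of_le_pvCommonLen {xs ys : List String} {m : Nat}
    (h : m ≤ pvCommonLen xs ys) : xs.take m = ys.take m := by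
  have h1 : xs.take m = (xs.take (pvCommonLen xs ys)).take m := by
    rw [List.take_take, Nat.min_eq_left h]
  have h2 : ys.take m = (ys.take (pvCommonLen xs ys)).take m := by
    rw [List.take_take, Nat.min_eq_left h]
  rw [h1, h2, take_pvCommonLen]

theorem le_pvCommonLen_of_take_eq {xs ys : List String} {m : Nat}
    (hx : m ≤ xs.length) (hy : m ≤ ys.length) (h : xs.take m = ys.take m) :
    m ≤ pvCommonLen xs ys := by
  induction m generalizing xs ys with
  | zero => exact Nat.zero_le _
  | succ m ih =>
    cases xs with
    | nil => simp at hx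
    | cons a xs =>
      cases ys with
      | nil => simp at hy
      | cons b ys =>
        simp only [List.take_succ_cons, List.cons.injEq] at h
        simp only [List.length_cons, Nat.succ_le_succ_iff] at hx hy
        simp only [pvCommonLen, h.1, beq_self_eq_true, if_true]
        exact Nat.succ_le_succ (ih hx hy h.2)

-- Nat.findGreatest helpers
theorem fg_self {P : Nat → Prop} [DecidablePred P] {b : Nat} (h : P b) :
    Nat.findGreatest P b = b := by
  rcases Nat.eq_zero_or_pos b with hb | hb
  · subst hb; rfl
  · exact Nat.findGreatest_eq_iff.mpr ⟨le_refl b, fun _ => h, fun k hk hk' => absurd hk' (by omega)⟩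

theorem fg_ext {P Q : Nat → Prop} [DecidablePred P] [DecidablePred Q] {a b : Nat}
    (hab : a ≤ b) (h1 : ∀ m ≤ a, (P m ↔ Q m)) (h2 : ∀ m, a < m → m ≤ b → ¬ Q m) :
    Nat.findGreatest P a = Nat.findGreatest Q b := by
  have hr := Nat.findGreatest_eq_iff (m := Nat.findGreatest P a) (k := a) (P := P) |>.mp rfl
  symm
  apply Nat.findGreatest_eq_iff.mpr
  refine ⟨le_trans hr.1 hab, fun hne => (h1 _ hr.1).mp (hr.2.1 hne), fun k hk hkb => ?_⟩
  by_cases hka : k ≤ a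
  · exact fun hq => hr.2.2 hk hka ((h1 _ hka).mpr hq)
  · exact h2 k (not_le.mp hka) hkb

-- the size->1 test of A's set of prefixes is exactly disagreement
theorem ofList_length_le_one_iff {α : Type} [BEq α] [LawfulBEq α] (x : α) (l : List α) :
    (PySem.Set.ofList (x :: l)).length ≤ 1 ↔ ∀ y ∈ l, y = x := by
  constructor
  · intro h y hy
    by_contra hne
    have hx : x ∈ PySem.Set.ofList (x :: l) := (PySem.Set.mem_ofList _ _).mpr (List.mem_cons_self)
    have hy' : y ∈ PySem.Set.ofList (x :: l) := (PySem.Set.mem_ofList _ _).mpr (List.mem_cons_of_mem _ hy)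
    match hs : PySem.Set.ofList (x :: l), h with
    | [], _ => rw [hs] at hx; simp at hx
    | [z], _ =>
      rw [hs] at hx hy'
      simp at hx hy'
      exact hne (hy'.trans hx.symm)
  · intro h
    have : PySem.Set.ofList (x :: l) = [x] := by
      rw [PySem.Set.ofList_eq_foldl]
      show List.foldl PySem.Set.add (PySem.Set.add [] x) l = [x]
      have hadd : PySem.Set.add ([] : List α) x = [x] := by rfl
      rw [hadd]
      induction l with
      | nil => rfl
      | cons y ys ih =>
        have hy : y = x := h y List.mem_cons_self
        have : PySem.Set.add [x] y = [x] := by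
          subst hy; simp [PySem.Set.add, PySem.Set.contains]
        simp only [List.foldl_cons, this]
        exact ih (fun z hz => h z (List.mem_cons_of_mem _ hz))
    rw [this]
    simp

theorem setTest_iff (t : List String) (rest : List (List String)) (n : Nat) :
    1 < (PySem.Set.ofList ((t :: rest).map (fun nm => nm.take n))).length ↔
      ¬ agreeB t rest n = true := by
  rw [agreeB_iff]
  rw [show (t :: rest).map (fun nm => nm.take n) = t.take n :: rest.map (fun nm => nm.take n) from rfl]
  rw [← not_le, not_iff_not, ofList_length_le_one_iff]
  simp

-- A's loop computes the greatest agreeing prefix length below its bound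
theorem loopA_eq (t : List String) (rest : List (List String)) (shortest : Nat) :
    ∀ fuel n, shortest + 1 - n = fuel → 1 ≤ n → n ≤ shortest + 1 →
      agreeB t rest (n - 1) = true →
      pvLoopA (t :: rest) shortest n =
        ((Nat.findGreatest (fun m => agreeB t rest m = true) shortest : Nat) : Int) := by
  intro fuel
  induction fuel with
  | zero =>
    intro n hf h1 hle hag
    have hn : n = shortest + 1 := by omega
    subst hn
    rw [pvLoopA]
    rw [if_neg (by omega)]
    have : Nat.findGreatest (fun m => agreeB t rest m = true) shortest = shortest := by
      apply fg_self
      simpa using hag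
    rw [this]
  | succ fuel ih =>
    intro n hf h1 hle hag
    have hn : n ≤ shortest := by omega
    rw [pvLoopA, if_pos hn]
    by_cases hset : 1 < (PySem.Set.ofList ((t :: rest).map (fun nm => nm.take n))).length
    · rw [if_pos hset]
      have hnot : ¬ agreeB t rest n = true := (setTest_iff t rest n).mp hset
      have : Nat.findGreatest (fun m => agreeB t rest m = true) shortest = n - 1 := by
        apply Nat.findGreatest_eq_iff.mpr
        refine ⟨by omega, fun _ => hag, fun k hk hkb hq => ?_⟩
        exact hnot (agree_mono t rest hq (by omega))
      rw [this]; omega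
    · rw [if_neg hset]
      have hag' : agreeB t rest n = true := by
        by_contra hc
        exact hset ((setTest_iff t rest n).mpr hc)
      exact ih (n + 1) (by omega) (by omega) (by omega) (by simpa using hag')

-- min of the lengths as A computes it
theorem foldl_min_le_init (l : List Nat) : ∀ x, List.foldl min x l ≤ x := by
  induction l with
  | nil => intro x; simp
  | cons a l ih => intro x; exact le_trans (ih (min x a)) (Nat.min_le_left _ _)

theorem le_foldl_min_iff (l : List Nat) : ∀ x y, y ≤ List.foldl min x l ↔ y ≤ x ∧ ∀ v ∈ l, y ≤ v := by
  induction l with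
  | nil => intro x y; simp
  | cons a l ih =>
    intro x y
    simp only [List.foldl_cons, ih, List.mem_cons]
    constructor
    · rintro ⟨h1, h2⟩
      exact ⟨le_trans h1 (Nat.min_le_left _ _),
        fun v hv => hv.elim (fun h => h ▸ le_trans h1 (Nat.min_le_right _ _)) (h2 v)⟩
    · rintro ⟨h1, h2⟩
      exact ⟨le_min h1 (h2 a (Or.inl rfl)), fun v hv => h2 v (Or.inr hv)⟩

theorem foldl_min_mono (l : List Nat) {x y : Nat} (h : x ≤ y) :
    List.foldl min x l ≤ List.foldl min y l := by
  rw [le_foldl_min_iff]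
  exact ⟨le_trans (foldl_min_le_init l x) h,
    fun v hv => ((le_foldl_min_iff l x _).mp (le_refl _)).2 v hv⟩

-- B's fold computes the same greatest agreeing prefix length
theorem foldB_eq (rest : List (List String)) :
    ∀ t : List String,
      (rest.foldl (fun pre u => pre.take (pvCommonLen pre u)) t).length =
        Nat.findGreatest (fun m => agreeB t rest m = true)
          (List.foldl min t.length (rest.map List.length)) := by
  induction rest with
  | nil =>
    intro t
    simp only [List.foldl_nil, List.map_nil]
    symm
    apply fg_self
    simp [agreeB]
  | cons u rest ih =>
    intro t
    simp only [List.foldl_cons, List.map_cons]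
    set c := pvCommonLen t u with hc
    have hct : c ≤ t.length := pvCommonLen_le_left t u
    have hcu : c ≤ u.length := pvCommonLen_le_right t u
    have hlen : (t.take c).length = c := by simp [Nat.min_eq_left hct]
    rw [ih (t.take c), hlen]
    apply fg_ext
    · exact foldl_min_mono _ (le_min hct hcu)
    · intro m hm
      have hmc : m ≤ c := le_trans hm (foldl_min_le_init _ _)
      have htake : (t.take c).take m = t.take m := by
        rw [List.take_take, Nat.min_eq_left hmc]
      have hu : u.take m = t.take m := (take_eq_of_le_pvCommonLen hmc).symm
      rw [agreeB_iff, agreeB_iff]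
      constructor
      · intro h v hv
        rcases List.mem_cons.mp hv with hv | hv
        · rw [hv]; exact hu
        · rw [← htake]; exact h v hv
      · intro h v hv
        rw [htake]; exact h v (List.mem_cons_of_mem _ hv)
    · intro m hm hmb
      have hmb' := (le_foldl_min_iff _ _ _).mp hmb
      have hmt : m ≤ t.length := le_trans hmb'.1 (Nat.min_le_left _ _)
      have hmu : m ≤ u.length := le_trans hmb'.1 (Nat.min_le_right _ _)
      rw [agreeB_iff]
      intro hall
      have hm2 : ¬ m ≤ List.foldl min c (List.map List.length rest) := not_le.mpr hm
      rw [le_foldl_min_iff] at hm2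
      push Not at hm2
      by_cases hmc : m ≤ c
      · rcases hm2 hmc with ⟨v, hv, hvlen⟩
        rcases List.mem_map.mp hv with ⟨w, hw, hwlen⟩
        have heq := hall w (List.mem_cons_of_mem _ hw)
        have h1 : (w.take m).length = w.length := by simp; omega
        have h2 : (t.take m).length = m := by simp [Nat.min_eq_left hmt]
        rw [heq] at h1
        omega
      · have := hall u List.mem_cons_self
        exact hmc (le_pvCommonLen_of_take_eq hmt hmu (this.symm))

-- ===== VERDICT (by name: the statement is the Claim_ definition above) =====
theorem find_common_prefix_len_py_spec : Claim_equal_find_common_prefix_len_py := by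
  intro tl _
  unfold Spec_find_common_prefix_len_py
  cases tl with
  | nil => rfl
  | cons t rest =>
    unfold find_common_prefix_len_py find_common_prefix_len_py_alt
    rw [if_neg (by simp)]
    have hmin : (PySem.List.min? ((t :: rest).map List.length) (fun x => x)).getD 0 =
        List.foldl min t.length (rest.map List.length) := by
      rw [List.map_cons, PySem.List.min?_id_cons]
      rfl
    simp only [hmin]
    rw [loopA_eq t rest _ (List.foldl min t.length (rest.map List.length) + 1 - 1) 1 rfl
      (le_refl 1) (by omega) (by simp [agreeB])]
    rw [foldB_eq rest t]
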